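-- pv_equiv track=rewrite | github.com/dastan-s01/Qysqa-platform | ai_generators.py | _parse_flashcards
-- ===== SOURCE A (Python) =====
-- def _parse_flashcards(content):
--     """Парсинг карточек из текста (скрыто в приватном методе)"""
--     lines = content.strip().split('\n')
--     flashcards = []
--     current_card = {}
--
--     for line in lines:
--         if line.startswith("Front:") or line.startswith("Question:"):
--             if current_card and 'front' in current_card:
--                 flashcards.append(current_card)
--             current_card = {}
--             current_card['front'] = line.split(":", 1)[1].strip() if ":" in line else ""
--         elif line.startswith("Back:") or line.startswith("Answer:"):
--             current_card['back'] = line.split(":", 1)[1].strip() if ":" in line else ""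
--
--     if current_card and 'front' in current_card and 'back' in current_card:
--         flashcards.append(current_card)
--
--     return flashcards
-- ===== SOURCE B (Python) =====
-- def _value(line):
--     return line.split(":", 1)[1].strip()
--
--
-- def _is_front(line):
--     return line.startswith("Front:") or line.startswith("Question:")
--
--
-- def _is_back(line):
--     return line.startswith("Back:") or line.startswith("Answer:")
--
--
-- def _block_to_card(block):
--     card = {'front': _value(block[0])}
--     backs = [l for l in block if _is_back(l)]
--     if backs:
--         card['back'] = _value(backs[-1])
--     return card
--
--
-- def _parse_flashcards(content):
--     # Pass 1: group the lines into blocks, one per Front:/Question: marker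
--     # (lines before the first marker are dropped).
--     lines = content.strip().split('\n')
--     blocks = []
--     for line in lines:
--         if _is_front(line):
--             blocks.append([line])
--         elif blocks:
--             blocks[-1].append(line)
--     # Pass 2: turn each block into a card; the last Back:/Answer: line wins.
--     cards = [_block_to_card(b) for b in blocks]
--     # The trailing card is kept only if it got a back.
--     if cards and 'back' not in cards[-1]:
--         cards.pop()
--     return cards
-- ===== Notes on version B (the rewrite author's own statement) =====
-- stated objective: alternative
-- what changed: Replaces A's single fold carrying a mutable current-card dict (flush-on-marker) by a two-pass decomposition: first group the lines into blocks, one per Front:/Question: marker, then map each block to a card using the last Back:/Answer: line, popping the trailing card if it has no back.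
import Mathlib
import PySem

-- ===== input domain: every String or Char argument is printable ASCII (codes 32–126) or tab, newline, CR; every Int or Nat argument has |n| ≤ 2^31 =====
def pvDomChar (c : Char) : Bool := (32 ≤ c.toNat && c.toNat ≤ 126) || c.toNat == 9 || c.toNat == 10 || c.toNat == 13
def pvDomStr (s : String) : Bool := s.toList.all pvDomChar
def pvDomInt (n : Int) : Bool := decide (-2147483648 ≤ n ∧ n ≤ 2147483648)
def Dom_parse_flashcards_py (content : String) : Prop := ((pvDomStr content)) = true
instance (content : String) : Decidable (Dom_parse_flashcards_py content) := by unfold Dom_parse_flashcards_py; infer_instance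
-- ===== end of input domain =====

-- B re-implements the parse as two passes (group lines into blocks per Front:/Question: marker, then
-- map each block to a card taking the last Back:/Answer: line) instead of A's single fold with a
-- mutable current-card dict; same return value, similar cost.

-- helpers shared by both ports (both Pythons contain these same expressions)
-- line.startswith("Front:") or line.startswith("Question:")
def pvIsFront (line : String) : Bool :=
  PySem.Str.startswith line "Front:" || PySem.Str.startswith line "Question:"
-- line.startswith("Back:") or line.startswith("Answer:")
def pvIsBack (line : String) : Bool :=
  PySem.Str.startswith line "Back:" || PySem.Str.startswith line "Answer:"
-- line.split(":", 1)[1].strip() — both fallback branches are unreachable when ":" is in line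
def pvColonVal (line : String) : String :=
  match PySem.Str.splitMax? line ":" 1 with
  | some (_ :: rest :: _) => PySem.Str.strip rest
  | _ => ""

-- ===== PORT A =====
def pvStepA (st : List (PySem.Dict String String) × PySem.Dict String String)
    (line : String) : List (PySem.Dict String String) × PySem.Dict String String :=
  if pvIsFront line then
    let fl := if !st.2.items.isEmpty && st.2.contains "front" then st.1 ++ [st.2] else st.1
    (fl, PySem.Dict.empty.insert "front"
           (if PySem.Str.isIn ":" line then pvColonVal line else ""))
  else if pvIsBack line then
    (st.1, st.2.insert "back" (if PySem.Str.isIn ":" line then pvColonVal line else ""))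
  else st

-- the trailing 'if current_card and 'front' in current_card and 'back' in current_card'
def pvFinishA (st : List (PySem.Dict String String) × PySem.Dict String String) :
    List (PySem.Dict String String) :=
  if !st.2.items.isEmpty && st.2.contains "front" && st.2.contains "back"
  then st.1 ++ [st.2] else st.1

def parse_flashcards_py (content : String) : List (List (String × String)) :=
  let lines := (PySem.Str.split? (PySem.Str.strip content) "\n").getD []  -- sep ≠ "": never none
  (pvFinishA (lines.foldl pvStepA ([], PySem.Dict.empty))).map (·.items)

-- ===== PORT B =====
-- pass 1 body: blocks.append([line]) / blocks[-1].append(line)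
def pvStepB (blocks : List (List String)) (line : String) : List (List String) :=
  if pvIsFront line then blocks ++ [[line]]
  else if !blocks.isEmpty then blocks.dropLast ++ [(blocks.getLast?.getD []) ++ [line]]
  else blocks

-- _block_to_card (block[0] and backs[-1] are read via headD/getLast?; never missing here)
def pvBlockToCard (block : List String) : PySem.Dict String String :=
  let card := PySem.Dict.empty.insert "front" (pvColonVal (block.headD ""))
  let backs := block.filter pvIsBack
  if !backs.isEmpty then card.insert "back" (pvColonVal (backs.getLast?.getD "")) else card

-- 'if cards and 'back' not in cards[-1]: cards.pop()'
def pvFinishB (cards : List (PySem.Dict String String)) : List (PySem.Dict String String) :=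
  if !cards.isEmpty && !((cards.getLast?.getD PySem.Dict.empty).contains "back")
  then cards.dropLast else cards

def parse_flashcards_py_alt (content : String) : List (List (String × String)) :=
  let lines := (PySem.Str.split? (PySem.Str.strip content) "\n").getD []  -- sep ≠ "": never none
  let blocks := lines.foldl pvStepB []
  (pvFinishB (blocks.map pvBlockToCard)).map (·.items)

-- ===== PRECONDITION & SPEC =====
def Spec_parse_flashcards_py (content : String) (out : List (List (String × String))) : Prop := out = parse_flashcards_py_alt content
instance (content : String) (out : List (List (String × String))) : Decidable (Spec_parse_flashcards_py content out) := by unfold Spec_parse_flashcards_py; infer_instance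

-- ===== CLAIM (what is proved, stated in full; the proofs are below) =====
def Claim_equal_parse_flashcards_py : Prop := ∀ (content : String), Dom_parse_flashcards_py content → Spec_parse_flashcards_py content (parse_flashcards_py content)

-- ===== LEMMAS AND PROOFS =====

lemma insert_front (x : String) :
    PySem.Dict.empty.insert "front" x = PySem.Dict.mk [("front", x)] := by
  simp [PySem.Dict.insert, PySem.Dict.empty]

lemma insert_back (x y : String) :
    (PySem.Dict.mk [("front", x)]).insert "back" y
      = PySem.Dict.mk [("front", x), ("back", y)] := by
  simp [PySem.Dict.insert, PySem.Dict.contains]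

lemma insert_back_overwrite (x y z : String) :
    (PySem.Dict.mk [("front", x), ("back", y)]).insert "back" z
      = PySem.Dict.mk [("front", x), ("back", z)] := by
  simp [PySem.Dict.insert, PySem.Dict.contains]

-- characterization of pvBlockToCard
lemma btc_eq (blk : List String) :
    pvBlockToCard blk
      = if (blk.filter pvIsBack).isEmpty
        then PySem.Dict.mk [("front", pvColonVal (blk.headD ""))]
        else PySem.Dict.mk [("front", pvColonVal (blk.headD "")),
                            ("back", pvColonVal ((blk.filter pvIsBack).getLast?.getD ""))] := by
  unfold pvBlockToCard
  split_ifs with h <;> simp_all [insert_front]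
  exact insert_back _ _

lemma btc_items_ne (blk : List String) : (pvBlockToCard blk).items.isEmpty = false := by
  rw [btc_eq]; split <;> rfl

lemma btc_contains_front (blk : List String) :
    (pvBlockToCard blk).contains "front" = true := by
  rw [btc_eq]; split <;> simp [PySem.Dict.contains]

lemma prefix_excl {l p q : List Char} (hp : p <+: l) (h1 : ¬(p <+: q)) (h2 : ¬(q <+: p)) :
    ¬ q <+: l :=
  fun hq => (List.prefix_or_prefix_of_prefix hp hq).elim h1 h2

lemma front_not_back (l : String) (h : pvIsFront l = true) : pvIsBack l = false := by
  simp only [pvIsFront, PySem.Str.startswith_eq, Bool.or_eq_true,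
    PySem.Chars.startswith_iff] at h
  simp only [pvIsBack, PySem.Str.startswith_eq, Bool.or_eq_false_iff]
  constructor <;> rw [Bool.eq_false_iff, ne_eq, PySem.Chars.startswith_iff] <;>
    rcases h with h | h <;> exact prefix_excl h (by decide) (by decide)

lemma colon_of_pref {l : String} {p : List Char} (hp : p <+: l.toList) (hc : (':' : Char) ∈ p) :
    PySem.Str.isIn ":" l = true := by
  simp only [PySem.Str.isIn_eq]
  rw [PySem.Chars.isIn_iff_infix]
  show (":".toList) <:+: l.toList
  obtain ⟨u, hu⟩ := hp
  obtain ⟨s, t, hst⟩ := (List.mem_iff_append.mp hc)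
  exact ⟨s, t ++ u, by rw [← hu, hst]; simp⟩

lemma front_colon (l : String) (h : pvIsFront l = true) : PySem.Str.isIn ":" l = true := by
  simp only [pvIsFront, PySem.Str.startswith_eq, Bool.or_eq_true,
    PySem.Chars.startswith_iff] at h
  rcases h with h | h <;> exact colon_of_pref h (by decide)

lemma back_colon (l : String) (h : pvIsBack l = true) : PySem.Str.isIn ":" l = true := by
  simp only [pvIsBack, PySem.Str.startswith_eq, Bool.or_eq_true,
    PySem.Chars.startswith_iff] at h
  rcases h with h | h <;> exact colon_of_pref h (by decide)

lemma btc_other (blk : List String) (l : String) (h1 : blk ≠ []) (h2 : pvIsBack l = false) :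
    pvBlockToCard (blk ++ [l]) = pvBlockToCard blk := by
  rw [btc_eq, btc_eq, List.filter_append]
  simp [h2, List.head?_append_of_ne_nil _ h1]

lemma btc_back (blk : List String) (l : String) (h1 : blk ≠ []) (h2 : pvIsBack l = true) :
    pvBlockToCard (blk ++ [l]) = (pvBlockToCard blk).insert "back" (pvColonVal l) := by
  rw [btc_eq, btc_eq, List.filter_append]
  simp only [List.filter_cons, h2, List.filter_nil]
  rw [List.getLast?_append_of_ne_nil _ (by simp)]
  by_cases hf : (List.filter pvIsBack blk).isEmpty <;>
    simp [hf, List.head?_append_of_ne_nil _ h1, insert_back, insert_back_overwrite]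

lemma btc_single (l : String) (h : pvIsFront l = true) :
    pvBlockToCard [l] = PySem.Dict.empty.insert "front" (if PySem.Str.isIn ":" l then pvColonVal l else "") := by
  rw [btc_eq, front_colon l h]
  simp [front_not_back l h, insert_front]

lemma stepB_ne (bs : List (List String)) (l : String) (h : bs ≠ []) : pvStepB bs l ≠ [] := by
  unfold pvStepB
  split_ifs <;> simp_all

lemma foldB_ne (ls : List String) (bs : List (List String)) (h : bs ≠ []) :
    ls.foldl pvStepB bs ≠ [] := by
  induction ls generalizing bs with
  | nil => exact h
  | cons l ls ih => exact ih _ (stepB_ne _ _ h)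

lemma stepB_append (bs bs' : List (List String)) (l : String) (h : bs' ≠ []) :
    pvStepB (bs ++ bs') l = bs ++ pvStepB bs' l := by
  unfold pvStepB
  by_cases hf : pvIsFront l
  · simp [hf]
  · simp only [hf, Bool.false_eq_true]
    have hne : bs ++ bs' ≠ [] := by simp [h]
    simp [List.isEmpty_eq_false_iff.mpr hne, List.isEmpty_eq_false_iff.mpr h,
      List.dropLast_append_of_ne_nil h, List.getLast?_append_of_ne_nil _ h]

lemma foldB_append (ls : List String) (bs bs' : List (List String)) (h : bs' ≠ []) :
    ls.foldl pvStepB (bs ++ bs') = bs ++ ls.foldl pvStepB bs' := by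
  induction ls generalizing bs' with
  | nil => rfl
  | cons l ls ih =>
      simp only [List.foldl_cons, stepB_append _ _ _ h]
      exact ih _ (stepB_ne _ _ h)

lemma loopA_eq (ls : List String) (acc : List (PySem.Dict String String)) (blk : List String)
    (h : blk ≠ []) :
    ls.foldl pvStepA (acc, pvBlockToCard blk)
      = (acc ++ ((ls.foldl pvStepB [blk]).dropLast).map pvBlockToCard,
         pvBlockToCard ((ls.foldl pvStepB [blk]).getLast?.getD [])) := by
  induction ls generalizing acc blk with
  | nil => simp
  | cons l ls ih =>
      simp only [List.foldl_cons]
      by_cases hf : pvIsFront l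
      · have hstepA : pvStepA (acc, pvBlockToCard blk) l = (acc ++ [pvBlockToCard blk], pvBlockToCard [l]) := by
          unfold pvStepA
          rw [btc_single l hf]
          simp [hf, btc_items_ne, btc_contains_front]
        have hstepB : pvStepB [blk] l = [blk] ++ [[l]] := by simp [pvStepB, hf]
        rw [hstepA, hstepB, foldB_append _ _ _ (by simp)]
        have hX : ls.foldl pvStepB [[l]] ≠ [] := foldB_ne _ _ (by simp)
        rw [ih (acc ++ [pvBlockToCard blk]) [l] (by simp)]
        rw [List.dropLast_append_of_ne_nil hX, List.getLast?_append_of_ne_nil _ hX]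
        simp
      · by_cases hb : pvIsBack l
        · have hstepA : pvStepA (acc, pvBlockToCard blk) l = (acc, pvBlockToCard (blk ++ [l])) := by
            unfold pvStepA
            rw [back_colon l hb, btc_back blk l h hb]
            simp [hf, hb]
          have hstepB : pvStepB [blk] l = [blk ++ [l]] := by simp [pvStepB, hf]
          rw [hstepA, hstepB, ih acc (blk ++ [l]) (by simp)]
        · have hstepA : pvStepA (acc, pvBlockToCard blk) l = (acc, pvBlockToCard blk) := by
            simp [pvStepA, hf, hb]
          have hstepB : pvStepB [blk] l = [blk ++ [l]] := by simp [pvStepB, hf]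
          rw [hstepA, hstepB, ← btc_other blk l h (by simp [hb]), ih acc (blk ++ [l]) (by simp)]

lemma finishEq (ls : List String) (blk : List String) (h : blk ≠ []) :
    pvFinishA (ls.foldl pvStepA ([], pvBlockToCard blk))
      = pvFinishB ((ls.foldl pvStepB [blk]).map pvBlockToCard) := by
  rw [loopA_eq ls [] blk h]
  have hB : ls.foldl pvStepB [blk] ≠ [] := foldB_ne _ _ (by simp)
  set B := ls.foldl pvStepB [blk] with hBdef
  have hlast : B.getLast?.getD [] = B.getLast hB := by
    rw [List.getLast?_eq_some_getLast hB]; rfl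
  unfold pvFinishA pvFinishB
  rw [hlast]
  simp only [btc_items_ne, btc_contains_front, Bool.not_false, Bool.true_and,
    List.getLast?_map, List.getLast?_eq_some_getLast hB, Option.map_some, Option.getD_some]
  have hmapne : (B.map pvBlockToCard).isEmpty = false := by
    simp [List.isEmpty_eq_false_iff, hB]
  rw [hmapne]
  by_cases hc : (pvBlockToCard (B.getLast hB)).contains "back"
  · simp only [hc, Bool.not_true, Bool.and_false]
    conv_rhs => rw [← List.dropLast_concat_getLast hB]
    simp
  · simp only [Bool.eq_false_iff.mpr hc, Bool.not_false, Bool.and_true, if_true]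
    rw [← List.map_dropLast]
    simp

lemma outEq (ls : List String) (cur : PySem.Dict String String)
    (h : cur.contains "front" = false) :
    pvFinishA (ls.foldl pvStepA ([], cur)) = pvFinishB ((ls.foldl pvStepB []).map pvBlockToCard) := by
  induction ls generalizing cur with
  | nil => simp [pvFinishA, pvFinishB, h]
  | cons l ls ih =>
      simp only [List.foldl_cons]
      by_cases hf : pvIsFront l
      · have hstepA : pvStepA ([], cur) l = ([], pvBlockToCard [l]) := by
          unfold pvStepA
          rw [btc_single l hf]
          simp [hf, h]
        have hstepB : pvStepB [] l = [[l]] := by simp [pvStepB, hf]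
        rw [hstepA, hstepB]
        exact finishEq ls [l] (by simp)
      · by_cases hb : pvIsBack l
        · have hstepA : pvStepA ([], cur) l = ([], cur.insert "back" (if PySem.Str.isIn ":" l then pvColonVal l else "")) := by
            simp [pvStepA, hf, hb]
          have hstepB : pvStepB [] l = [] := by simp [pvStepB, hf]
          rw [hstepA, hstepB]
          exact ih _ (by rw [PySem.Dict.contains_insert]; simp [h])
        · have hstepA : pvStepA ([], cur) l = ([], cur) := by simp [pvStepA, hf, hb]
          have hstepB : pvStepB [] l = [] := by simp [pvStepB, hf]
          rw [hstepA, hstepB]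
          exact ih _ h

-- ===== VERDICT (by name: the statement is the Claim_ definition above) =====
theorem parse_flashcards_py_spec : Claim_equal_parse_flashcards_py := by
  intro content _
  unfold Spec_parse_flashcards_py parse_flashcards_py parse_flashcards_py_alt
  simp only []
  rw [outEq _ _ rfl]
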